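-- pv_equiv track=rewrite | github.com/mcp10/Chatter | chatter/bot.py | _glob_anchor
-- ===== SOURCE A (Python) =====
-- _GLOB_META_CHARS = set("*?[]{}")
--
-- def _glob_anchor(pattern: str) -> str:
--     first_glob = len(pattern)
--     for idx, char in enumerate(pattern):
--         if char in _GLOB_META_CHARS:
--             first_glob = idx
--             break
--     anchor = pattern[:first_glob].strip()
--     return anchor or "."
-- ===== SOURCE B (Python) =====
-- _GLOB_META_CHARS = set("*?[]{}")
--
-- def _glob_anchor(pattern: str) -> str:
--     positions = [p for p in (pattern.find(c) for c in "*?[]{}") if p != -1]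
--     first_glob = min(positions) if positions else len(pattern)
--     anchor = pattern[:first_glob].strip()
--     return anchor or "."
-- ===== Notes on version B (the rewrite author's own statement) =====
-- stated objective: faster
-- what changed: Replaces the single Python-level early-exit enumerate scan with six independent str.find scans (one per glob metacharacter) whose non-(-1) results are min-reduced to the first metacharacter position.
import Mathlib
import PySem

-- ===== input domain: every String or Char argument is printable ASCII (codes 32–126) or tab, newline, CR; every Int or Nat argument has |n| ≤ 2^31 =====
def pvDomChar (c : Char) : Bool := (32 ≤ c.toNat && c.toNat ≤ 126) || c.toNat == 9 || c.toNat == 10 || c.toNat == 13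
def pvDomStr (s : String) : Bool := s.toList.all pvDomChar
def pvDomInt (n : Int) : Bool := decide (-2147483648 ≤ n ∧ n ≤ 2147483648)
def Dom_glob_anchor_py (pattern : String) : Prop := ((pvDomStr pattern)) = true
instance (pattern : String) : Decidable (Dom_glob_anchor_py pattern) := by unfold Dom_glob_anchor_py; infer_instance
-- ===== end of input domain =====

-- B replaces A's Python-level early-exit character scan with per-metacharacter str.find scans whose hits are min-reduced (objective: faster by constant factor, measured).

-- _GLOB_META_CHARS (module-level constant shared by both versions)
def pvMetaChars : List Char := "*?[]{}".toList

-- ===== PORT A =====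
-- the for/enumerate loop with break: returns the idx of the first meta char, else the length
def pvScanA : List Char → Nat → Nat
  | [], idx => idx
  | c :: rest, idx => if pvMetaChars.contains c then idx else pvScanA rest (idx + 1)

def glob_anchor_py (pattern : String) : String :=
  let cs := pattern.toList
  let firstGlob := pvScanA cs 0
  let anchor := PySem.Chars.strip (PySem.List.slice cs none (some (firstGlob : Int)))
  if anchor = [] then "." else String.ofList anchor

-- ===== PORT B =====
-- positions = [p for p in (pattern.find(c) for c in "*?[]{}") if p != -1]; min(positions) if positions else len(pattern)
def glob_anchor_py_alt (pattern : String) : String :=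
  let cs := pattern.toList
  let positions := (pvMetaChars.map (fun c => PySem.Chars.find cs [c])).filter (fun p => p != -1)
  let firstGlob : Int :=
    match PySem.List.min? positions (fun p => p : Int → Int) with
    | some m => m
    | none => (cs.length : Int)
  let anchor := PySem.Chars.strip (PySem.List.slice cs none (some firstGlob))
  if anchor = [] then "." else String.ofList anchor

-- ===== PRECONDITION & SPEC =====
def Spec_glob_anchor_py (pattern : String) (out : String) : Prop := out = glob_anchor_py_alt pattern
instance (pattern : String) (out : String) : Decidable (Spec_glob_anchor_py pattern out) := by unfold Spec_glob_anchor_py; infer_instance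

-- ===== CLAIM (what is proved, stated in full; the proofs are below) =====
def Claim_equal_glob_anchor_py : Prop := ∀ (pattern : String), Dom_glob_anchor_py pattern → Spec_glob_anchor_py pattern (glob_anchor_py pattern)

-- ===== LEMMAS AND PROOFS =====

theorem pv_go_nonneg_or (sub : List Char) (cs : List Char) (k : Nat) :
    PySem.Chars.find.go sub cs k = -1 ∨ (k : Int) ≤ PySem.Chars.find.go sub cs k := by
  induction cs generalizing k with
  | nil =>
    simp only [PySem.Chars.find.go]
    split <;> simp
  | cons h t ih =>
    simp only [PySem.Chars.find.go]
    split
    · right; simp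
    · rcases ih (k+1) with h1 | h1
      · left; exact h1
      · right; omega

theorem pv_go_shift (sub : List Char) (cs : List Char) (k : Nat) :
    PySem.Chars.find.go sub cs k =
      if PySem.Chars.find.go sub cs 0 = -1 then -1 else PySem.Chars.find.go sub cs 0 + k := by
  induction cs generalizing k with
  | nil =>
    simp only [PySem.Chars.find.go]
    split <;> simp
  | cons h t ih =>
    simp only [PySem.Chars.find.go]
    split
    · simp
    · rw [ih (k+1), ih 1]
      rcases pv_go_nonneg_or sub t 0 with h1 | h1
      · simp [h1]
      · have : PySem.Chars.find.go sub t 0 ≠ -1 := by omega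
        simp only [this, if_false]
        have h2 : PySem.Chars.find.go sub t 0 + 1 ≠ -1 := by omega
        simp [h2]
        ring

theorem pv_find_single_cons (c x : Char) (r : List Char) :
    PySem.Chars.find (x :: r) [c] =
      if c = x then 0
      else if PySem.Chars.find r [c] = -1 then -1 else PySem.Chars.find r [c] + 1 := by
  simp only [PySem.Chars.find, PySem.Chars.find.go, List.isPrefixOf]
  by_cases h : c = x
  · simp [h]
  · simp only [h, if_false]
    have hb : (c == x) = false := by simp [h]
    simp only [hb]
    simp only [Bool.false_and]
    rw [pv_go_shift]
    simp



def pvFirstB (cs : List Char) : Int :=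
  match PySem.List.min? ((pvMetaChars.map (fun c => PySem.Chars.find cs [c])).filter (fun p => p != -1)) (fun p => p : Int → Int) with
  | some m => m
  | none => (cs.length : Int)

theorem pv_scanA_shift (cs : List Char) (k : Nat) : pvScanA cs k = k + pvScanA cs 0 := by
  induction cs generalizing k with
  | nil => simp [pvScanA]
  | cons c r ih =>
    simp only [pvScanA]
    split
    · simp
    · rw [ih (k+1), ih 1]; omega

theorem pv_foldl_min_add_one (t : List Int) (x : Int) :
    List.foldl min (x + 1) (t.map (· + 1)) = List.foldl min x t + 1 := by
  induction t generalizing x with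
  | nil => simp
  | cons y r ih =>
    simp only [List.map_cons, List.foldl_cons]
    have : min (x + 1) (y + 1) = min x y + 1 := by omega
    rw [this, ih]

theorem pv_min?_map_add_one (l : List Int) :
    PySem.List.min? (l.map (· + 1)) (fun p => p : Int → Int)
      = (PySem.List.min? l (fun p => p : Int → Int)).map (· + 1) := by
  cases l with
  | nil => simp [PySem.List.min?]
  | cons x t =>
    rw [List.map_cons, PySem.List.min?_id_cons, PySem.List.min?_id_cons]
    simp [pv_foldl_min_add_one]

theorem pv_filter_shift (l : List Int) (h : ∀ t ∈ l, t = -1 ∨ 0 ≤ t) :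
    (l.map (fun t => if t = -1 then -1 else t + 1)).filter (fun p => p != -1)
      = (l.filter (fun p => p != -1)).map (· + 1) := by
  induction l with
  | nil => simp
  | cons t r ih =>
    have hr : ∀ t ∈ r, t = -1 ∨ 0 ≤ t := fun u hu => h u (List.mem_cons_of_mem _ hu)
    by_cases ht : t = -1
    · simp only [List.map_cons, List.filter_cons, ht]
      simp [ih hr]
    · have h0 : 0 ≤ t := (h t (List.mem_cons_self)).resolve_left ht
      have h1 : t + 1 ≠ -1 := by omega
      simp only [List.map_cons, List.filter_cons, if_neg ht]
      simp only [bne_iff_ne, ne_eq, h1, not_false_eq_true, if_pos, ht]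
      simp [ih hr]

theorem pv_first_eq (cs : List Char) : pvFirstB cs = (pvScanA cs 0 : Int) := by
  induction cs with
  | nil => decide
  | cons x r ih =>
    by_cases hx : pvMetaChars.contains x
    · -- x is a meta char: A returns 0; B's positions contain 0 and are all ≥ 0
      have hmem0 : (0 : Int) ∈ (pvMetaChars.map (fun c => PySem.Chars.find (x :: r) [c])).filter (fun p => p != -1) := by
        rw [List.mem_filter]
        constructor
        · rw [List.mem_map]
          refine ⟨x, by simpa using hx, ?_⟩
          rw [pv_find_single_cons]; simp
        · decide
      have hnonneg : ∀ p ∈ (pvMetaChars.map (fun c => PySem.Chars.find (x :: r) [c])).filter (fun p => p != -1), (0:Int) ≤ p := by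
        intro p hp
        rw [List.mem_filter] at hp
        obtain ⟨hp1, hp2⟩ := hp
        rw [List.mem_map] at hp1
        obtain ⟨c, _, rfl⟩ := hp1
        rcases pv_go_nonneg_or [c] (x :: r) 0 with h1 | h1
        · exfalso; revert hp2; simp [PySem.Chars.find, h1]
        · exact h1
      unfold pvFirstB
      cases hm : PySem.List.min? ((pvMetaChars.map (fun c => PySem.Chars.find (x :: r) [c])).filter (fun p => p != -1)) (fun p => p : Int → Int) with
      | none =>
        rw [PySem.List.min?_eq_none_iff] at hm
        rw [hm] at hmem0; simp at hmem0
      | some m =>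
        have h1 := PySem.List.min?_isMin hm 0 hmem0
        have h2 := hnonneg m (PySem.List.min?_mem hm)
        have : m = 0 := le_antisymm h1 h2
        subst this
        show (0 : Int) = ((pvScanA (x :: r) 0 : Nat) : Int)
        simp only [pvScanA]
        rw [if_pos hx]
        simp
    · -- x is not a meta char: every find shifts by one
      have hmap : (pvMetaChars.map (fun c => PySem.Chars.find (x :: r) [c]))
          = (pvMetaChars.map (fun c => PySem.Chars.find r [c])).map (fun t => if t = -1 then -1 else t + 1) := by
        rw [List.map_map]
        apply List.map_congr_left
        intro c hc
        have hcx : c ≠ x := by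
          intro h; subst h; exact hx (by simpa using hc)
        simp [pv_find_single_cons, hcx]
      have hnn : ∀ t ∈ (pvMetaChars.map (fun c => PySem.Chars.find r [c])), t = -1 ∨ 0 ≤ t := by
        intro t ht
        rw [List.mem_map] at ht
        obtain ⟨c, _, rfl⟩ := ht
        exact pv_go_nonneg_or [c] r 0
      unfold pvFirstB at ih ⊢
      rw [hmap, pv_filter_shift _ hnn, pv_min?_map_add_one]
      have hsc : pvScanA (x :: r) 0 = 1 + pvScanA r 0 := by
        simp only [pvScanA]
        rw [if_neg hx]
        exact pv_scanA_shift r 1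
      cases hm : PySem.List.min? ((pvMetaChars.map (fun c => PySem.Chars.find r [c])).filter (fun p => p != -1)) (fun p => p : Int → Int) with
      | none =>
        rw [hm] at ih
        simp only [Option.map_none]
        simp at ih
        rw [hsc]
        simp only [List.length_cons]
        push_cast
        omega
      | some m =>
        rw [hm] at ih
        simp only [Option.map_some]
        simp at ih
        rw [hsc]
        push_cast
        omega

-- ===== VERDICT (by name: the statement is the Claim_ definition above) =====
theorem glob_anchor_py_spec : Claim_equal_glob_anchor_py := by
  intro pattern _
  show glob_anchor_py pattern = glob_anchor_py_alt pattern
  have h := pv_first_eq pattern.toList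
  unfold pvFirstB at h
  simp only [glob_anchor_py, glob_anchor_py_alt]
  rw [h]
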